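-- pv_equiv track=rewrite | github.com/PeteRoyAlex/sotd_modules | sotd_modules/colours.py | colour_filter
-- ===== SOURCE A (Python) =====
-- def colour_filter(colour):
--
--         # Yellow, Red, Blue, Purple, Green, Pink, Silver,
--         # Orange, White, Black, Grey, Gold, Multi, Brown
--         this = colour
--
--         viariants = ['Yellow', 'lemon']
--         if any(x.lower() in colour.lower() for x in viariants):
--             colour = viariants[0]
--         viariants = ['Red', 'berry', 'rose']
--         if any(x.lower() in colour.lower() for x in viariants):
--             colour = viariants[0]
--         viariants = ['Blue', 'Navy', 'teal']
--         if any(x.lower() in colour.lower() for x in viariants):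
--             colour = viariants[0]
--         viariants = ['Purple']
--         if any(x.lower() in colour.lower() for x in viariants):
--             colour = viariants[0]
--         viariants = ['Green', 'Khaki','Turquoise', 'mint']
--         if any(x.lower() in colour.lower() for x in viariants):
--             colour = viariants[0]
--         viariants = ['Pink', 'fuschia', 'magenta']
--         if any(x.lower() in colour.lower() for x in viariants):
--             colour = viariants[0]
--         viariants = ['Silver']
--         if any(x.lower() in colour.lower() for x in viariants):
--             colour = viariants[0]
--         viariants = ['Orange', 'coral']
--         if any(x.lower() in colour.lower() for x in viariants):
--             colour = viariants[0]
--         viariants = ['White', 'Ivory', 'cream', 'stone']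
--         if any(x.lower() in colour.lower() for x in viariants):
--             colour = viariants[0]
--         viariants = ['Black','blk']
--         if any(x.lower() in colour.lower() for x in viariants):
--             colour = viariants[0]
--         viariants = ['Grey']
--         if any(x.lower() in colour.lower() for x in viariants):
--             colour = viariants[0]
--         viariants = ['Gold']
--         if any(x.lower() in colour.lower() for x in viariants):
--             colour = viariants[0]
--         viariants = ['Multi', 'various']
--         if any(x.lower() in colour.lower() for x in viariants):
--             colour = viariants[0]
--         viariants = ['Brown', 'bronze', 'rust']
--         if any(x.lower() in colour.lower() for x in viariants):
--             colour = viariants[0]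
--
--         if this == colour:
--             colour = ""
--
--         return colour
-- ===== SOURCE B (Python) =====
-- BLOCKS = [
--     ['Yellow', 'lemon'],
--     ['Red', 'berry', 'rose'],
--     ['Blue', 'Navy', 'teal'],
--     ['Purple'],
--     ['Green', 'Khaki', 'Turquoise', 'mint'],
--     ['Pink', 'fuschia', 'magenta'],
--     ['Silver'],
--     ['Orange', 'coral'],
--     ['White', 'Ivory', 'cream', 'stone'],
--     ['Black', 'blk'],
--     ['Grey'],
--     ['Gold'],
--     ['Multi', 'various'],
--     ['Brown', 'bronze', 'rust'],
-- ]
--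
--
-- def colour_filter(colour):
--     low = colour.lower()
--     result = colour
--     for variants in BLOCKS:
--         if any(v.lower() in low for v in variants):
--             result = variants[0]
--             break
--     return "" if result == colour else result
-- ===== Notes on version B (the rewrite author's own statement) =====
-- stated objective: simpler
-- what changed: Replaces A's 14 sequential mutate-the-accumulator if-blocks (each re-lowering the current value) with one data table and a single first-match-wins loop with early exit over the once-lowered input; equivalence rests on the proved fact that no canonical name matches any other block, so A's cascade is first-match-wins.
import Mathlib
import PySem

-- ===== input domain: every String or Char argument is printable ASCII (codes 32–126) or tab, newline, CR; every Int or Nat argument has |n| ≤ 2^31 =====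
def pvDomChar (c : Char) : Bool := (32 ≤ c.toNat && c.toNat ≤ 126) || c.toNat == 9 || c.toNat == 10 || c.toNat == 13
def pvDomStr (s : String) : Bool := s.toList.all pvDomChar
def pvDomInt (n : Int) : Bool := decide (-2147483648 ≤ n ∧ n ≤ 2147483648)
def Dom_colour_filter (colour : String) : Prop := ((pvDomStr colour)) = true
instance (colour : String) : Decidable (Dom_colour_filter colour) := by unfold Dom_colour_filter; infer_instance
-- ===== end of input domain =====

-- B replaces A's 14 sequential mutate-the-accumulator if-blocks with one table and a
-- single first-match-wins loop over the once-lowered input (objective: simpler).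


-- shared test 'any(x.lower() in low for x in vs)' (both Pythons compute exactly this)
def pvCond (vs : List String) (low : String) : Bool :=
  vs.any (fun x => PySem.Str.isIn (PySem.Str.lower x) low)

-- ===== PORT A =====
-- one 'viariants = …; if any(...): colour = viariants[0]' block of A
def aStep (vs : List String) (col : String) : String :=
  if pvCond vs (PySem.Str.lower col) then vs.headD "" else col

def colour_filter (colour : String) : String :=
  let c1 := aStep ["Yellow", "lemon"] colour
  let c2 := aStep ["Red", "berry", "rose"] c1
  let c3 := aStep ["Blue", "Navy", "teal"] c2
  let c4 := aStep ["Purple"] c3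
  let c5 := aStep ["Green", "Khaki", "Turquoise", "mint"] c4
  let c6 := aStep ["Pink", "fuschia", "magenta"] c5
  let c7 := aStep ["Silver"] c6
  let c8 := aStep ["Orange", "coral"] c7
  let c9 := aStep ["White", "Ivory", "cream", "stone"] c8
  let c10 := aStep ["Black", "blk"] c9
  let c11 := aStep ["Grey"] c10
  let c12 := aStep ["Gold"] c11
  let c13 := aStep ["Multi", "various"] c12
  let c14 := aStep ["Brown", "bronze", "rust"] c13
  if colour == c14 then "" else c14

-- ===== PORT B =====
def bBlocks : List (List String) :=
  [["Yellow", "lemon"], ["Red", "berry", "rose"], ["Blue", "Navy", "teal"], ["Purple"],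
   ["Green", "Khaki", "Turquoise", "mint"], ["Pink", "fuschia", "magenta"], ["Silver"],
   ["Orange", "coral"], ["White", "Ivory", "cream", "stone"], ["Black", "blk"], ["Grey"],
   ["Gold"], ["Multi", "various"], ["Brown", "bronze", "rust"]]

-- B's loop with early exit: first block whose variant occurs in the lowered input
def bFind (low : String) : List (List String) → Option String
  | [] => none
  | vs :: rest => if pvCond vs low then some (vs.headD "") else bFind low rest

def colour_filter_alt (colour : String) : String :=
  let result := (bFind (PySem.Str.lower colour) bBlocks).getD colour
  if result == colour then "" else result

-- ===== PRECONDITION & SPEC =====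
def Spec_colour_filter (colour : String) (out : String) : Prop := out = colour_filter_alt colour
instance (colour : String) (out : String) : Decidable (Spec_colour_filter colour out) := by unfold Spec_colour_filter; infer_instance

-- ===== CLAIM (what is proved, stated in full; the proofs are below) =====
def Claim_equal_colour_filter : Prop := ∀ (colour : String), Dom_colour_filter colour → Spec_colour_filter colour (colour_filter colour)

-- ===== LEMMAS AND PROOFS =====

-- A's chain of blocks, as a fold (definitionally equal to colour_filter's let-chain)
def pvChain (bs : List (List String)) (col : String) : String :=
  bs.foldl (fun c vs => aStep vs c) col

lemma pvChain_dead (bs : List (List String)) (c : String)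
    (h : ∀ vs ∈ bs, pvCond vs (PySem.Str.lower c) = false) : pvChain bs c = c := by
  induction bs with
  | nil => rfl
  | cons vs rest ih =>
      have hvs := h vs (by simp)
      have hstep : aStep vs c = c := by simp [aStep, hvs]
      calc pvChain (vs :: rest) c = pvChain rest (aStep vs c) := rfl
        _ = pvChain rest c := by rw [hstep]
        _ = c := ih fun ws hw => h ws (by simp [hw])

-- once a block fires, all later blocks are dead: A's cascade is first-match-wins
lemma pvChain_eq_bFind (bs : List (List String)) (col : String)
    (H : bs.Pairwise (fun vs ws => pvCond ws (PySem.Str.lower (vs.headD "")) = false)) :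
    pvChain bs col = (bFind (PySem.Str.lower col) bs).getD col := by
  induction bs generalizing col with
  | nil => rfl
  | cons vs rest ih =>
      rcases List.pairwise_cons.mp H with ⟨hdead, Hrest⟩
      by_cases h : pvCond vs (PySem.Str.lower col) = true
      · have hstep : aStep vs col = vs.headD "" := by simp [aStep, h]
        have hfind : bFind (PySem.Str.lower col) (vs :: rest) = some (vs.headD "") := by
          simp [bFind, h]
        calc pvChain (vs :: rest) col = pvChain rest (aStep vs col) := rfl
          _ = pvChain rest (vs.headD "") := by rw [hstep]
          _ = vs.headD "" := pvChain_dead rest (vs.headD "") hdead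
          _ = (bFind (PySem.Str.lower col) (vs :: rest)).getD col := by rw [hfind]; rfl
      · have h' : pvCond vs (PySem.Str.lower col) = false := by simpa using h
        have hstep : aStep vs col = col := by simp [aStep, h']
        have hfind : bFind (PySem.Str.lower col) (vs :: rest) = bFind (PySem.Str.lower col) rest := by
          simp [bFind, h']
        calc pvChain (vs :: rest) col = pvChain rest (aStep vs col) := rfl
          _ = pvChain rest col := by rw [hstep]
          _ = (bFind (PySem.Str.lower col) rest).getD col := ih col Hrest
          _ = (bFind (PySem.Str.lower col) (vs :: rest)).getD col := by rw [hfind]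

set_option maxRecDepth 40000 in
lemma bBlocks_pairwise :
    bBlocks.Pairwise (fun vs ws => pvCond ws (PySem.Str.lower (vs.headD "")) = false) := by
  decide

set_option maxRecDepth 100000 in
theorem colour_filter_eq_alt (colour : String) :
    colour_filter colour = colour_filter_alt colour := by
  have hA : colour_filter colour =
      (if colour == pvChain bBlocks colour then "" else pvChain bBlocks colour) := by
    rw [colour_filter, pvChain, bBlocks]
    rw [List.foldl_cons, List.foldl_cons, List.foldl_cons, List.foldl_cons, List.foldl_cons,
        List.foldl_cons, List.foldl_cons, List.foldl_cons, List.foldl_cons, List.foldl_cons,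
        List.foldl_cons, List.foldl_cons, List.foldl_cons, List.foldl_cons, List.foldl_nil]
  have hB : colour_filter_alt colour =
      (if (bFind (PySem.Str.lower colour) bBlocks).getD colour == colour then ""
       else (bFind (PySem.Str.lower colour) bBlocks).getD colour) := by
    rw [colour_filter_alt]
  have hchain : pvChain bBlocks colour = (bFind (PySem.Str.lower colour) bBlocks).getD colour :=
    pvChain_eq_bFind bBlocks colour bBlocks_pairwise
  rw [hA, hchain, hB]
  generalize (bFind (PySem.Str.lower colour) bBlocks).getD colour = r
  by_cases h : colour = r
  · subst h; rfl
  · have h1 : (colour == r) = false := by simp [h]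
    have h2 : (r == colour) = false := by simp [Ne.symm h]
    rw [h1, h2]

-- ===== VERDICT (by name: the statement is the Claim_ definition above) =====
theorem colour_filter_spec : Claim_equal_colour_filter := by
  intro colour _
  unfold Spec_colour_filter
  exact colour_filter_eq_alt colour
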